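-- pv_equiv track=rewrite | github.com/adityavkk/Sandbox | problems/HackerRank/connectedBlocks.py | f
-- ===== SOURCE A (Python) =====
-- def f(mat):
--     regions = []
--     visited = set()
--     n = len(mat)
--     m = len(mat[0])
--
--     def inRange(c):
--         (i, j) = c
--         return i < n and j < m and i >= 0 and j >= 0
--
--     def dfs(c):
--         (i, j) = c
--         neighbors = filter(inRange, [(i, j + 1), (i, j - 1), (i + 1, j),
--                                      (i - 1, j), (i + 1, j + 1), (i + 1, j - 1),
--                                      (i - 1, j - 1), (i - 1, j + 1)])
--         ns = [n for n in neighbors if not n in visited and mat[n[0]][n[1]] == 1]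
--         for n in ns:
--             visited.add(n)
--         return sum([dfs(n) for n in ns]) + 1
--
--     for i in range(0, n):
--         for j in range(0, m):
--             cell = mat[i][j]
--             if cell == 1 and (not (i, j) in visited):
--                 visited.add((i, j))
--                 count = dfs((i, j))
--                 regions.append(count)
--     return max(regions)
-- ===== SOURCE B (Python) =====
-- def f(mat):
--     n, m = len(mat), len(mat[0])
--     visited = set()
--     sizes = []
--     for i in range(n):
--         for j in range(m):
--             if mat[i][j] == 1 and (i, j) not in visited:
--                 visited.add((i, j))
--                 stack = [(i, j)]
--                 size = 0
--                 while stack: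
--                     (x, y) = stack.pop()
--                     size += 1
--                     for dx in (-1, 0, 1):
--                         for dy in (-1, 0, 1):
--                             nx, ny = x + dx, y + dy
--                             if 0 <= nx < n and 0 <= ny < m and (nx, ny) not in visited and mat[nx][ny] == 1:
--                                 visited.add((nx, ny))
--                                 stack.append((nx, ny))
--                 sizes.append(size)
--     return max(sizes)
-- ===== Notes on version B (the rewrite author's own statement) =====
-- stated objective: alternative
-- what changed: The recursive DFS with a mutable closure is replaced by an explicit stack-based iterative flood fill that counts cells as they are popped off the stack.
import Mathlib
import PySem

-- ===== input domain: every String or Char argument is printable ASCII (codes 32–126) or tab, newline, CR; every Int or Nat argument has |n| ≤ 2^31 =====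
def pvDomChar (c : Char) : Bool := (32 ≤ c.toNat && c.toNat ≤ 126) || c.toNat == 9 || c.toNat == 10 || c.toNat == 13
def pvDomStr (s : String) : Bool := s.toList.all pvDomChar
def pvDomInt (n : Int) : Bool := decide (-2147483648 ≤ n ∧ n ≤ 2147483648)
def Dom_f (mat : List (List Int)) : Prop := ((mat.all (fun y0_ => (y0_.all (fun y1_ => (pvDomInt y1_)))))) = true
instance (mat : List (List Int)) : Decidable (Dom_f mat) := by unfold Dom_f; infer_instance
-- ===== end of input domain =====

-- B replaces A's recursive DFS (mutable-closure dfs) by an explicit stack-based iterative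
-- flood fill over the same visited set; same cost, different decomposition ("alternative").

-- ===== PORT A =====
def pvInRange (n m : Int) (c : Int × Int) : Bool :=
  decide (c.1 < n ∧ c.2 < m ∧ 0 ≤ c.1 ∧ 0 ≤ c.2)

-- mat[i][j]; totalised with defaults: only evaluated on in-range indices
-- (Pre_f guarantees every row has length ≥ len(mat[0]))
def pvVal (mat : List (List Int)) (c : Int × Int) : Int :=
  PySem.List.pyGetD (PySem.List.pyGetD mat c.1 []) c.2 0

def pvNbrs (n m : Int) (c : Int × Int) : List (Int × Int) :=
  [(c.1, c.2 + 1), (c.1, c.2 - 1), (c.1 + 1, c.2), (c.1 - 1, c.2),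
   (c.1 + 1, c.2 + 1), (c.1 + 1, c.2 - 1), (c.1 - 1, c.2 - 1), (c.1 - 1, c.2 + 1)].filter
    (pvInRange n m)

-- A's dfs; Python recursion carries no fuel: the fuel only bounds the recursion depth and is
-- chosen large enough at the call site that it is never exhausted (proved below).
def pvDfs (mat : List (List Int)) (n m : Int) :
    Nat → PySem.Set (Int × Int) → Int × Int → Int × PySem.Set (Int × Int)
  | 0, visited, _ => (1, visited)
  | fuel + 1, visited, c =>
    let ns := (pvNbrs n m c).filter fun x => !(PySem.Set.contains visited x) && (pvVal mat x == 1)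
    let visited1 := ns.foldl (fun v x => PySem.Set.add v x) visited
    let r := ns.foldl (fun (p : Int × PySem.Set (Int × Int)) x =>
        let q := pvDfs mat n m fuel p.2 x
        (p.1 + q.1, q.2)) ((0 : Int), visited1)
    (r.1 + 1, r.2)

def f (mat : List (List Int)) : Int :=
  let n : Int := mat.length
  let m : Int := (mat.headD []).length   -- len(mat[0]); IndexError on [] is excluded by Pre_f
  let st := (PySem.List.pyRange 0 n 1).foldl (fun st i =>
      (PySem.List.pyRange 0 m 1).foldl (fun (st : List Int × PySem.Set (Int × Int)) j =>
        let cell := pvVal mat (i, j)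
        if (cell == 1) && !(PySem.Set.contains st.2 (i, j)) then
          let visited := PySem.Set.add st.2 (i, j)
          let q := pvDfs mat n m (n.toNat * m.toNat) visited (i, j)
          (st.1 ++ [q.1], q.2)
        else st) st)
    (([] : List Int), (PySem.Set.empty : PySem.Set (Int × Int)))
  (PySem.List.max? st.1 (fun x => x)).getD 0   -- max(regions); ValueError on [] excluded by Pre_f

-- ===== PORT B =====
-- B's while-loop; the fuel bounds the number of iterations and is chosen large enough at the
-- call site that it is never exhausted (proved below).
def pvFlood (mat : List (List Int)) (n m : Int) :
    Nat → PySem.Set (Int × Int) → List (Int × Int) → Int → Int × PySem.Set (Int × Int)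
  | 0, visited, _, size => (size, visited)
  | fuel + 1, visited, stack, size =>
    match PySem.List.pop? stack (-1) with   -- stack.pop(); the while-loop ends on an empty stack
    | none => (size, visited)
    | some (c, rest) =>
      let size1 := size + 1
      let st := [(-1 : Int), 0, 1].foldl (fun st dx =>
          [(-1 : Int), 0, 1].foldl (fun (st : PySem.Set (Int × Int) × List (Int × Int)) dy =>
            let nc := (c.1 + dx, c.2 + dy)
            if (decide (0 ≤ nc.1 ∧ nc.1 < n ∧ 0 ≤ nc.2 ∧ nc.2 < m)) &&
                !(PySem.Set.contains st.1 nc) && (pvVal mat nc == 1) then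
              (PySem.Set.add st.1 nc, st.2 ++ [nc])
            else st) st) (visited, rest)
      pvFlood mat n m fuel st.1 st.2 size1

def f_alt (mat : List (List Int)) : Int :=
  let n : Int := mat.length
  let m : Int := (mat.headD []).length
  let st := (PySem.List.pyRange 0 n 1).foldl (fun st i =>
      (PySem.List.pyRange 0 m 1).foldl (fun (st : List Int × PySem.Set (Int × Int)) j =>
        if (pvVal mat (i, j) == 1) && !(PySem.Set.contains st.2 (i, j)) then
          let visited := PySem.Set.add st.2 (i, j)
          let q := pvFlood mat n m (n.toNat * m.toNat) visited [(i, j)] 0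
          (st.1 ++ [q.1], q.2)
        else st) st)
    (([] : List Int), (PySem.Set.empty : PySem.Set (Int × Int)))
  (PySem.List.max? st.1 (fun x => x)).getD 0   -- max(sizes); ValueError on [] excluded by Pre_f

-- ===== PRECONDITION & SPEC =====
-- Pre_f excludes exactly the inputs on which A raises: the empty matrix (IndexError on mat[0]),
-- a row shorter than the first row (IndexError on mat[i][j]), and grids with no 1 among the
-- first len(mat[0]) columns (ValueError: max of an empty list).
def Pre_f (mat : List (List Int)) : Prop :=
  mat ≠ [] ∧ (∀ row ∈ mat, (mat.headD []).length ≤ row.length) ∧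
    (∃ row ∈ mat, ∃ x ∈ row.take (mat.headD []).length, x = 1)
instance (mat : List (List Int)) : Decidable (Pre_f mat) := by unfold Pre_f; infer_instance
def pvWitness_f : List (List Int) := [[1, 0], [0, 1]]

def Spec_f (mat : List (List Int)) (out : Int) : Prop := out = f_alt mat
instance (mat : List (List Int)) (out : Int) : Decidable (Spec_f mat out) := by unfold Spec_f; infer_instance

-- ===== CLAIM (what is proved, stated in full; the proofs are below) =====
def Claim_equal_f : Prop := ∀ (mat : List (List Int)), Dom_f mat → Pre_f mat → Spec_f mat (f mat)

-- ===== LEMMAS AND PROOFS =====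

-- The set of 1-cells of the grid.
noncomputable def pvOnes (mat : List (List Int)) (n m : Int) : Finset (Int × Int) :=
  ((Finset.Icc 0 (n - 1)) ×ˢ (Finset.Icc 0 (m - 1))).filter fun c => pvVal mat c = 1

-- One exploration step: y is an in-range 8-neighbour of x holding a 1 and not in the avoid set S.
def pvStep (mat : List (List Int)) (n m : Int) (S : Set (Int × Int)) (x y : Int × Int) : Prop :=
  y ∈ pvNbrs n m x ∧ pvVal mat y = 1 ∧ y ∉ S

def pvReach (mat : List (List Int)) (n m : Int) (S : Set (Int × Int)) (c x : Int × Int) : Prop :=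
  Relation.ReflTransGen (pvStep mat n m S) c x

def pvMem (V : List (Int × Int)) : Set (Int × Int) := {x | x ∈ V}


def pvNine (c : Int × Int) : List (Int × Int) :=
  [(-1 : Int), 0, 1].flatMap fun dx => [(-1 : Int), 0, 1].map fun dy => (c.1 + dx, c.2 + dy)

def pvCondB (mat : List (List Int)) (n m : Int) (V : PySem.Set (Int × Int)) (z : Int × Int) : Bool :=
  (decide (0 ≤ z.1 ∧ z.1 < n ∧ 0 ≤ z.2 ∧ z.2 < m)) && !(PySem.Set.contains V z) && (pvVal mat z == 1)

lemma mem_pvNbrs (n m : Int) (c z : Int × Int) :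
    z ∈ pvNbrs n m c ↔ pvInRange n m z = true ∧ z ≠ c ∧
      c.1 - 1 ≤ z.1 ∧ z.1 ≤ c.1 + 1 ∧ c.2 - 1 ≤ z.2 ∧ z.2 ≤ c.2 + 1 := by
  obtain ⟨p, q⟩ := c; obtain ⟨a, b⟩ := z
  simp only [pvNbrs, List.mem_filter, List.mem_cons, List.not_mem_nil, or_false,
    Prod.mk.injEq, ne_eq]
  constructor
  · rintro ⟨h1, h2⟩; exact ⟨h2, by omega⟩
  · rintro ⟨h1, h2⟩; exact ⟨by omega, h1⟩

lemma nodup_pvNbrs (n m : Int) (c : Int × Int) : (pvNbrs n m c).Nodup := by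
  obtain ⟨p, q⟩ := c
  apply List.Nodup.filter
  simp [List.nodup_cons, Prod.ext_iff]
  omega

lemma mem_pvNine (c z : Int × Int) :
    z ∈ pvNine c ↔ c.1 - 1 ≤ z.1 ∧ z.1 ≤ c.1 + 1 ∧ c.2 - 1 ≤ z.2 ∧ z.2 ≤ c.2 + 1 := by
  obtain ⟨p, q⟩ := c; obtain ⟨a, b⟩ := z
  simp only [pvNine, List.mem_flatMap, List.mem_map, List.mem_cons, List.not_mem_nil, or_false,
    Prod.mk.injEq]
  constructor
  · rintro ⟨dx, hdx, dy, hdy, h1, h2⟩; omega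
  · rintro ⟨h1, h2, h3, h4⟩
    exact ⟨a - p, by omega, ⟨b - q, by omega, by omega, by omega⟩⟩

lemma nodup_pvNine (c : Int × Int) : (pvNine c).Nodup := by
  obtain ⟨p, q⟩ := c
  simp [pvNine, List.nodup_cons, Prod.ext_iff]

lemma mem_pvOnes (mat : List (List Int)) (n m : Int) (z : Int × Int) :
    z ∈ pvOnes mat n m ↔ (0 ≤ z.1 ∧ z.1 < n ∧ 0 ≤ z.2 ∧ z.2 < m) ∧ pvVal mat z = 1 := by
  simp only [pvOnes, Finset.mem_filter, Finset.mem_product, Finset.mem_Icc]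
  constructor
  · rintro ⟨⟨h1, h2⟩, h3⟩; exact ⟨by omega, h3⟩
  · rintro ⟨h1, h2⟩; exact ⟨⟨by omega, by omega⟩, h2⟩

-- a step target characterized by the A-side child filter
lemma mem_ns_iff (mat : List (List Int)) (n m : Int) (V : PySem.Set (Int × Int)) (c z : Int × Int) :
    z ∈ (pvNbrs n m c).filter (fun x => !(PySem.Set.contains V x) && (pvVal mat x == 1)) ↔
      pvStep mat n m (pvMem V) c z := by
  simp [List.mem_filter, pvStep, pvMem]
  tauto

-- a step target characterized by the B-side push condition (given that c itself is visited)
lemma mem_pushFilter_iff (mat : List (List Int)) (n m : Int) (V : PySem.Set (Int × Int))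
    (c z : Int × Int) (hc : c ∈ V) :
    z ∈ (pvNine c).filter (pvCondB mat n m V) ↔ pvStep mat n m (pvMem V) c z := by
  simp only [List.mem_filter, mem_pvNine, pvCondB, pvStep, mem_pvNbrs, pvMem, pvInRange,
    Bool.and_eq_true, Bool.not_eq_true', decide_eq_true_eq, beq_iff_eq, Set.mem_setOf_eq, ne_eq]
  have hcont : (PySem.Set.contains V z = false) ↔ ¬ z ∈ V := by
    rw [← PySem.Set.contains_iff]
    simp
  rw [hcont]
  constructor
  · rintro ⟨hnine, ⟨hbnd, hnv⟩, hval⟩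
    exact ⟨⟨by omega, fun hzc => hnv (hzc ▸ hc), by omega, by omega, by omega, by omega⟩, hval, hnv⟩
  · rintro ⟨⟨h1, h2, h3, h4, h5, h6⟩, h7, h8⟩
    exact ⟨by omega, ⟨by omega, h8⟩, h7⟩

lemma pvReach_mono (mat : List (List Int)) (n m : Int) (S T : Set (Int × Int)) (hST : S ⊆ T)
    (c x : Int × Int) (h : pvReach mat n m T c x) : pvReach mat n m S c x := by
  refine Relation.ReflTransGen.mono ?_ h
  rintro a b ⟨h1, h2, h3⟩
  exact ⟨h1, h2, fun hb => h3 (hST hb)⟩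

lemma length_eq_of_mem_iff {l l' : List (Int × Int)} (h1 : l.Nodup) (h2 : l'.Nodup)
    (h : ∀ x, x ∈ l ↔ x ∈ l') : l.length = l'.length :=
  List.Perm.length_eq ((List.perm_ext_iff_of_nodup h1 h2).2 h)


lemma foldl_add_eq_append (V L : List (Int × Int)) (hL : L.Nodup) (hf : ∀ x ∈ L, x ∉ V) :
    L.foldl (fun v x => PySem.Set.add v x) V = V ++ L := by
  exact PySem.Set.update_eq_append_of_disjoint V L hL hf

lemma foldl_push (mat : List (List Int)) (n m : Int) :
    ∀ (L : List (Int × Int)) (V : PySem.Set (Int × Int)) (R : List (Int × Int)), L.Nodup →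
    L.foldl (fun st z => if pvCondB mat n m st.1 z then (PySem.Set.add st.1 z, st.2 ++ [z]) else st)
        (V, R)
      = (V ++ L.filter (pvCondB mat n m V), R ++ L.filter (pvCondB mat n m V))
  | [], V, R, _ => by simp
  | z :: L, V, R, hnd => by
    have hz : z ∉ L := (List.nodup_cons.1 hnd).1
    have hL : L.Nodup := (List.nodup_cons.1 hnd).2
    cases h : pvCondB mat n m V z with
    | false =>
      rw [List.foldl_cons, List.filter_cons_of_neg (by simp [h])]
      simpa [h] using foldl_push mat n m L V R hL
    | true =>
      have hzv : z ∉ V := by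
        have hc := PySem.Set.contains_iff V z
        simp only [pvCondB, Bool.and_eq_true, Bool.not_eq_true'] at h
        intro hmem
        rw [← hc] at hmem
        rw [h.1.2] at hmem
        exact Bool.false_ne_true hmem
      have hadd : PySem.Set.add V z = V ++ [z] := PySem.Set.add_of_not_mem hzv
      have hfc : L.filter (pvCondB mat n m (V ++ [z])) = L.filter (pvCondB mat n m V) := by
        apply List.filter_congr
        intro w hw
        have hwz : w ≠ z := fun e => hz (e ▸ hw)
        simp [pvCondB, hwz]
      rw [List.foldl_cons, List.filter_cons_of_pos (by simp [h])]
      have hstep : (if pvCondB mat n m (V, R).1 z then (PySem.Set.add (V, R).1 z, (V, R).2 ++ [z])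
          else (V, R)) = (V ++ [z], R ++ [z]) := by
        simp [h, hadd]
      rw [hstep, foldl_push mat n m L (V ++ [z]) (R ++ [z]) hL, hfc, List.append_assoc,
        List.append_assoc]
      rfl

-- The B port's 3×3 offset double loop is the fold over pvNine.
lemma flood_inner_eq (mat : List (List Int)) (n m : Int) (c : Int × Int)
    (st0 : PySem.Set (Int × Int) × List (Int × Int)) :
    ([(-1 : Int), 0, 1].foldl (fun st dx =>
        [(-1 : Int), 0, 1].foldl (fun (st : PySem.Set (Int × Int) × List (Int × Int)) dy =>
          let nc := (c.1 + dx, c.2 + dy)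
          if (decide (0 ≤ nc.1 ∧ nc.1 < n ∧ 0 ≤ nc.2 ∧ nc.2 < m)) &&
              !(PySem.Set.contains st.1 nc) && (pvVal mat nc == 1) then
            (PySem.Set.add st.1 nc, st.2 ++ [nc])
          else st) st) st0)
      = (pvNine c).foldl
          (fun st z => if pvCondB mat n m st.1 z then (PySem.Set.add st.1 z, st.2 ++ [z]) else st)
          st0 := rfl

lemma card_drop (mat : List (List Int)) (n m : Int) (V N : List (Int × Int)) (hN : N.Nodup)
    (hfresh : ∀ z ∈ N, z ∉ V) (hones : ∀ z ∈ N, z ∈ pvOnes mat n m) :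
    (pvOnes mat n m \ (V ++ N).toFinset).card + N.length = (pvOnes mat n m \ V.toFinset).card := by
  have hsub : N.toFinset ⊆ pvOnes mat n m \ V.toFinset := by
    intro x hx
    rw [List.mem_toFinset] at hx
    rw [Finset.mem_sdiff, List.mem_toFinset]
    exact ⟨hones x hx, hfresh x hx⟩
  have hsplit : pvOnes mat n m \ (V ++ N).toFinset = (pvOnes mat n m \ V.toFinset) \ N.toFinset := by
    rw [List.toFinset_append]
    ext x
    simp only [Finset.mem_sdiff, Finset.mem_union]
    tauto
  rw [hsplit, Finset.card_sdiff, Finset.inter_eq_left.2 hsub, List.toFinset_card_of_nodup hN]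
  have := Finset.card_le_card hsub
  rw [List.toFinset_card_of_nodup hN] at this
  omega

lemma card_top (mat : List (List Int)) (n m : Int) (V : List (Int × Int)) (r : Int × Int)
    (hr1 : r ∈ pvOnes mat n m) (hr2 : r ∈ V) :
    (pvOnes mat n m \ V.toFinset).card + 1 ≤ n.toNat * m.toNat := by
  have hsub : pvOnes mat n m \ V.toFinset ⊆ (pvOnes mat n m).erase r := by
    intro x hx
    rw [Finset.mem_sdiff, List.mem_toFinset] at hx
    rw [Finset.mem_erase]
    exact ⟨fun e => hx.2 (e ▸ hr2), hx.1⟩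
  have h1 : (pvOnes mat n m \ V.toFinset).card ≤ (pvOnes mat n m).card - 1 := by
    rw [← Finset.card_erase_of_mem hr1]
    exact Finset.card_le_card hsub
  have h2 : (pvOnes mat n m).card ≤ n.toNat * m.toNat := by
    refine le_trans (Finset.card_filter_le _ _) ?_
    rw [Finset.card_product, Int.card_Icc, Int.card_Icc]
    have e1 : n - 1 + 1 - 0 = n := by ring
    have e2 : m - 1 + 1 - 0 = m := by ring
    rw [e1, e2]
  have h3 : 1 ≤ (pvOnes mat n m).card := Finset.card_pos.2 ⟨r, hr1⟩
  omega


-- Any marking process that is monotone, sound and closed marks exactly  V ∪ (reachable from roots).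
lemma mark_char (mat : List (List Int)) (n m : Int) (V M roots : List (Int × Int))
    (hroots : ∀ s ∈ roots, s ∈ V)
    (mono : ∀ x ∈ V, x ∈ M)
    (sound : ∀ x ∈ M, x ∈ V ∨ ∃ s ∈ roots, pvReach mat n m (pvMem V) s x)
    (closed : ∀ x, ((x ∈ M ∧ x ∉ V) ∨ x ∈ roots) →
      ∀ y, y ∈ pvNbrs n m x → pvVal mat y = 1 → y ∈ M) :
    ∀ x, x ∈ M ↔ (x ∈ V ∨ ∃ s ∈ roots, pvReach mat n m (pvMem V) s x) := by
  intro x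
  constructor
  · exact sound x
  · rintro (hx | ⟨s, hs, hreach⟩)
    · exact mono x hx
    · suffices h : x ∈ M ∧ (x = s ∨ x ∉ V) from h.1
      induction hreach with
      | refl => exact ⟨mono s (hroots s hs), Or.inl rfl⟩
      | tail h1 h2 ih =>
        obtain ⟨hbM, hb⟩ := ih
        obtain ⟨hnbr, hval, hnv⟩ := h2
        refine ⟨closed _ ?_ _ hnbr hval, Or.inr hnv⟩
        rcases hb with rfl | hb
        · exact Or.inr hs
        · exact Or.inl ⟨hbM, hb⟩

lemma pvDfs_fold_spec (mat : List (List Int)) (n m : Int) (fuel : Nat)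
    (IH : ∀ (V : PySem.Set (Int × Int)) (c : Int × Int), V.Nodup → c ∈ V →
      (pvOnes mat n m \ V.toFinset).card + 1 ≤ fuel →
      (∀ x ∈ V, x ∈ (pvDfs mat n m fuel V c).2) ∧ (pvDfs mat n m fuel V c).2.Nodup ∧
        (∀ x ∈ (pvDfs mat n m fuel V c).2, x ∈ V ∨ pvReach mat n m (pvMem V) c x) ∧
        (∀ x, ((x ∈ (pvDfs mat n m fuel V c).2 ∧ x ∉ V) ∨ x = c) →
          ∀ y, y ∈ pvNbrs n m x → pvVal mat y = 1 → y ∈ (pvDfs mat n m fuel V c).2) ∧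
        ((pvDfs mat n m fuel V c).1 = ((pvDfs mat n m fuel V c).2.length : Int) - V.length + 1)) :
    ∀ (l : List (Int × Int)) (acc : Int) (W : PySem.Set (Int × Int)), W.Nodup →
      (∀ s ∈ l, s ∈ W) →
      (l ≠ [] → (pvOnes mat n m \ W.toFinset).card + 1 ≤ fuel) →
      (∀ x ∈ W, x ∈ (l.foldl (fun (p : Int × PySem.Set (Int × Int)) x =>
          let q := pvDfs mat n m fuel p.2 x
          (p.1 + q.1, q.2)) (acc, W)).2) ∧
      (l.foldl (fun (p : Int × PySem.Set (Int × Int)) x =>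
          let q := pvDfs mat n m fuel p.2 x
          (p.1 + q.1, q.2)) (acc, W)).2.Nodup ∧
      (∀ x ∈ (l.foldl (fun (p : Int × PySem.Set (Int × Int)) x =>
          let q := pvDfs mat n m fuel p.2 x
          (p.1 + q.1, q.2)) (acc, W)).2, x ∈ W ∨ ∃ s ∈ l, pvReach mat n m (pvMem W) s x) ∧
      (∀ x, ((x ∈ (l.foldl (fun (p : Int × PySem.Set (Int × Int)) x =>
          let q := pvDfs mat n m fuel p.2 x
          (p.1 + q.1, q.2)) (acc, W)).2 ∧ x ∉ W) ∨ x ∈ l) →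
        ∀ y, y ∈ pvNbrs n m x → pvVal mat y = 1 → y ∈ (l.foldl (fun (p : Int × PySem.Set (Int × Int)) x =>
          let q := pvDfs mat n m fuel p.2 x
          (p.1 + q.1, q.2)) (acc, W)).2) ∧
      ((l.foldl (fun (p : Int × PySem.Set (Int × Int)) x =>
          let q := pvDfs mat n m fuel p.2 x
          (p.1 + q.1, q.2)) (acc, W)).1 = acc + (((l.foldl (fun (p : Int × PySem.Set (Int × Int)) x =>
          let q := pvDfs mat n m fuel p.2 x
          (p.1 + q.1, q.2)) (acc, W)).2.length : Int) - W.length) + l.length) := by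
  intro l
  induction l with
  | nil =>
    intro acc W hW _ _
    simp only [List.foldl_nil]
    refine ⟨fun x hx => hx, hW, fun x hx => Or.inl hx, ?_, by simp⟩
    rintro x (⟨hx, hnx⟩ | hx) y _ _
    · exact absurd hx hnx
    · simp at hx
  | cons s L ihl =>
    intro acc W hW hsub hbound
    have hsW : s ∈ W := hsub s (by simp)
    have hb : (pvOnes mat n m \ W.toFinset).card + 1 ≤ fuel := hbound (by simp)
    obtain ⟨qmono, qnodup, qsound, qclosed, qcount⟩ := IH W s hW hsW hb
    have hstep : ((fun (p : Int × PySem.Set (Int × Int)) x =>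
        let q := pvDfs mat n m fuel p.2 x
        (p.1 + q.1, q.2)) (acc, W) s)
        = (acc + (pvDfs mat n m fuel W s).1, (pvDfs mat n m fuel W s).2) := rfl
    have hWsub : ∀ x ∈ W, x ∈ (pvDfs mat n m fuel W s).2 := qmono
    have hsubL : ∀ x ∈ L, x ∈ (pvDfs mat n m fuel W s).2 :=
      fun x hx => qmono x (hsub x (List.mem_cons_of_mem _ hx))
    have hboundL : L ≠ [] → (pvOnes mat n m \ (pvDfs mat n m fuel W s).2.toFinset).card + 1 ≤ fuel := by
      intro _
      have hsubF : W.toFinset ⊆ (pvDfs mat n m fuel W s).2.toFinset := by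
        intro a ha
        rw [List.mem_toFinset] at ha ⊢
        exact qmono a ha
      have := Finset.card_le_card
        (Finset.sdiff_subset_sdiff (Finset.Subset.refl (pvOnes mat n m)) hsubF)
      omega
    obtain ⟨fmono, fnodup, fsound, fclosed, fcount⟩ :=
      ihl (acc + (pvDfs mat n m fuel W s).1) (pvDfs mat n m fuel W s).2 qnodup hsubL hboundL
    suffices h :
        (∀ x ∈ W, x ∈ (L.foldl (fun (p : Int × PySem.Set (Int × Int)) x =>
            let q := pvDfs mat n m fuel p.2 x
            (p.1 + q.1, q.2)) (acc + (pvDfs mat n m fuel W s).1, (pvDfs mat n m fuel W s).2)).2) ∧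
        (L.foldl (fun (p : Int × PySem.Set (Int × Int)) x =>
            let q := pvDfs mat n m fuel p.2 x
            (p.1 + q.1, q.2)) (acc + (pvDfs mat n m fuel W s).1, (pvDfs mat n m fuel W s).2)).2.Nodup ∧
        (∀ x ∈ (L.foldl (fun (p : Int × PySem.Set (Int × Int)) x =>
            let q := pvDfs mat n m fuel p.2 x
            (p.1 + q.1, q.2)) (acc + (pvDfs mat n m fuel W s).1, (pvDfs mat n m fuel W s).2)).2,
          x ∈ W ∨ ∃ t ∈ s :: L, pvReach mat n m (pvMem W) t x) ∧
        (∀ x, ((x ∈ (L.foldl (fun (p : Int × PySem.Set (Int × Int)) x =>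
            let q := pvDfs mat n m fuel p.2 x
            (p.1 + q.1, q.2)) (acc + (pvDfs mat n m fuel W s).1, (pvDfs mat n m fuel W s).2)).2 ∧
            x ∉ W) ∨ x ∈ s :: L) →
          ∀ y, y ∈ pvNbrs n m x → pvVal mat y = 1 → y ∈ (L.foldl (fun (p : Int × PySem.Set (Int × Int)) x =>
            let q := pvDfs mat n m fuel p.2 x
            (p.1 + q.1, q.2)) (acc + (pvDfs mat n m fuel W s).1, (pvDfs mat n m fuel W s).2)).2) ∧
        ((L.foldl (fun (p : Int × PySem.Set (Int × Int)) x =>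
            let q := pvDfs mat n m fuel p.2 x
            (p.1 + q.1, q.2)) (acc + (pvDfs mat n m fuel W s).1, (pvDfs mat n m fuel W s).2)).1 =
          acc + (((L.foldl (fun (p : Int × PySem.Set (Int × Int)) x =>
            let q := pvDfs mat n m fuel p.2 x
            (p.1 + q.1, q.2)) (acc + (pvDfs mat n m fuel W s).1, (pvDfs mat n m fuel W s).2)).2.length : Int)
            - W.length) + (s :: L).length) by
      exact h
    refine ⟨fun x hx => fmono x (qmono x hx), fnodup, ?_, ?_, ?_⟩
    · intro x hx
      rcases fsound x hx with hxq | ⟨t, ht, hr⟩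
      · rcases qsound x hxq with hxW | hr
        · exact Or.inl hxW
        · exact Or.inr ⟨s, by simp, hr⟩
      · refine Or.inr ⟨t, List.mem_cons_of_mem _ ht,
          pvReach_mono mat n m (pvMem W) (pvMem (pvDfs mat n m fuel W s).2)
            (fun a ha => qmono a ha) _ _ hr⟩
    · rintro x (⟨hxr, hxW⟩ | hxl) y hynbr hyval
      · by_cases hxq : x ∈ (pvDfs mat n m fuel W s).2
        · exact fmono y (qclosed x (Or.inl ⟨hxq, hxW⟩) y hynbr hyval)
        · exact fclosed x (Or.inl ⟨hxr, hxq⟩) y hynbr hyval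
      · rcases List.mem_cons.1 hxl with rfl | hxL
        · exact fmono y (qclosed x (Or.inr rfl) y hynbr hyval)
        · exact fclosed x (Or.inr hxL) y hynbr hyval
    · rw [fcount, qcount]
      simp only [List.length_cons]
      push_cast
      ring

lemma pvDfs_spec (mat : List (List Int)) (n m : Int) :
    ∀ (fuel : Nat) (V : PySem.Set (Int × Int)) (c : Int × Int), V.Nodup → c ∈ V →
      (pvOnes mat n m \ V.toFinset).card + 1 ≤ fuel →
      (∀ x ∈ V, x ∈ (pvDfs mat n m fuel V c).2) ∧ (pvDfs mat n m fuel V c).2.Nodup ∧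
        (∀ x ∈ (pvDfs mat n m fuel V c).2, x ∈ V ∨ pvReach mat n m (pvMem V) c x) ∧
        (∀ x, ((x ∈ (pvDfs mat n m fuel V c).2 ∧ x ∉ V) ∨ x = c) →
          ∀ y, y ∈ pvNbrs n m x → pvVal mat y = 1 → y ∈ (pvDfs mat n m fuel V c).2) ∧
        ((pvDfs mat n m fuel V c).1 = ((pvDfs mat n m fuel V c).2.length : Int) - V.length + 1) := by
  intro fuel
  induction fuel with
  | zero => intro V c _ _ hb; omega
  | succ fuel ihf =>
    intro V c hV hc hb
    have hnsN : ((pvNbrs n m c).filter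
        (fun x => !(PySem.Set.contains V x) && (pvVal mat x == 1))).Nodup :=
      List.Nodup.filter _ (nodup_pvNbrs n m c)
    have hns_step : ∀ z, z ∈ (pvNbrs n m c).filter
        (fun x => !(PySem.Set.contains V x) && (pvVal mat x == 1)) ↔
        pvStep mat n m (pvMem V) c z := fun z => mem_ns_iff mat n m V c z
    have hfresh : ∀ z ∈ (pvNbrs n m c).filter
        (fun x => !(PySem.Set.contains V x) && (pvVal mat x == 1)), z ∉ V :=
      fun z hz hmem => ((hns_step z).1 hz).2.2 hmem
    have hones : ∀ z ∈ (pvNbrs n m c).filter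
        (fun x => !(PySem.Set.contains V x) && (pvVal mat x == 1)), z ∈ pvOnes mat n m := by
      intro z hz
      obtain ⟨hnbr, hval, _⟩ := (hns_step z).1 hz
      rw [mem_pvNbrs] at hnbr
      have hb' := hnbr.1
      simp only [pvInRange, decide_eq_true_eq] at hb'
      exact (mem_pvOnes mat n m z).2 ⟨by omega, hval⟩
    set ns := (pvNbrs n m c).filter
        (fun x => !(PySem.Set.contains V x) && (pvVal mat x == 1)) with hnsdef
    have hV1 : ns.foldl (fun v x => PySem.Set.add v x) V = V ++ ns :=
      foldl_add_eq_append V ns hnsN hfresh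
    have hV1nodup : (V ++ ns).Nodup := by
      rw [List.nodup_append]
      refine ⟨hV, hnsN, ?_⟩
      intro a ha b hb hab
      exact hfresh b hb (hab ▸ ha)
    have hcard := card_drop mat n m V ns hnsN hfresh hones
    have hboundfold : ns ≠ [] → (pvOnes mat n m \ (V ++ ns).toFinset).card + 1 ≤ fuel := by
      intro hne
      have : 1 ≤ ns.length := List.length_pos_iff.2 hne
      omega
    obtain ⟨fmono, fnodup, fsound, fclosed, fcount⟩ :=
      pvDfs_fold_spec mat n m fuel ihf ns 0 (V ++ ns) hV1nodup
        (fun s hs => List.mem_append.2 (Or.inr hs)) hboundfold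
    have hunfold : pvDfs mat n m (fuel + 1) V c =
        ((ns.foldl (fun (p : Int × PySem.Set (Int × Int)) x =>
            let q := pvDfs mat n m fuel p.2 x
            (p.1 + q.1, q.2)) (0, V ++ ns)).1 + 1,
         (ns.foldl (fun (p : Int × PySem.Set (Int × Int)) x =>
            let q := pvDfs mat n m fuel p.2 x
            (p.1 + q.1, q.2)) (0, V ++ ns)).2) := by
      show ((ns.foldl (fun (p : Int × PySem.Set (Int × Int)) x =>
            let q := pvDfs mat n m fuel p.2 x
            (p.1 + q.1, q.2)) (0, ns.foldl (fun v x => PySem.Set.add v x) V)).1 + 1,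
         (ns.foldl (fun (p : Int × PySem.Set (Int × Int)) x =>
            let q := pvDfs mat n m fuel p.2 x
            (p.1 + q.1, q.2)) (0, ns.foldl (fun v x => PySem.Set.add v x) V)).2) = _
      rw [hV1]
    rw [hunfold]
    have hVsub : ∀ x ∈ V, x ∈ V ++ ns := fun x hx => List.mem_append.2 (Or.inl hx)
    refine ⟨fun x hx => fmono x (hVsub x hx), fnodup, ?_, ?_, ?_⟩
    · intro x hx
      rcases fsound x hx with hxV1 | ⟨s, hs, hr⟩
      · rcases List.mem_append.1 hxV1 with hxV | hxns
        · exact Or.inl hxV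
        · exact Or.inr (Relation.ReflTransGen.single ((hns_step x).1 hxns))
      · refine Or.inr (Relation.ReflTransGen.head ((hns_step s).1 hs) ?_)
        exact pvReach_mono mat n m (pvMem V) (pvMem (V ++ ns)) (fun a ha => hVsub a ha) _ _ hr
    · rintro x (⟨hxr, hxV⟩ | rfl) y hynbr hyval
      · by_cases hxns : x ∈ ns
        · exact fclosed x (Or.inr hxns) y hynbr hyval
        · have hxV1 : x ∉ V ++ ns := by
            rw [List.mem_append]
            rintro (h | h)
            · exact hxV h
            · exact hxns h
          exact fclosed x (Or.inl ⟨hxr, hxV1⟩) y hynbr hyval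
      · by_cases hyV : y ∈ V
        · exact fmono y (hVsub y hyV)
        · have hyns : y ∈ ns := (hns_step y).2 ⟨hynbr, hyval, hyV⟩
          exact fmono y (List.mem_append.2 (Or.inr hyns))
    · rw [fcount]
      rw [List.length_append]
      push_cast
      ring

lemma pvFlood_spec (mat : List (List Int)) (n m : Int) :
    ∀ (fuel : Nat) (V : PySem.Set (Int × Int)) (stack : List (Int × Int)) (size : Int),
      V.Nodup → (∀ s ∈ stack, s ∈ V) →
      (pvOnes mat n m \ V.toFinset).card + stack.length ≤ fuel →
      (∀ x ∈ V, x ∈ (pvFlood mat n m fuel V stack size).2) ∧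
        (pvFlood mat n m fuel V stack size).2.Nodup ∧
        (∀ x ∈ (pvFlood mat n m fuel V stack size).2,
          x ∈ V ∨ ∃ s ∈ stack, pvReach mat n m (pvMem V) s x) ∧
        (∀ x, ((x ∈ (pvFlood mat n m fuel V stack size).2 ∧ x ∉ V) ∨ x ∈ stack) →
          ∀ y, y ∈ pvNbrs n m x → pvVal mat y = 1 → y ∈ (pvFlood mat n m fuel V stack size).2) ∧
        ((pvFlood mat n m fuel V stack size).1 =
          size + stack.length + (((pvFlood mat n m fuel V stack size).2.length : Int) - V.length)) := by
  intro fuel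
  induction fuel with
  | zero =>
    intro V stack size hV hss hb
    have hstack : stack = [] := List.eq_nil_of_length_eq_zero (by omega)
    subst hstack
    have hred : pvFlood mat n m 0 V [] size = (size, V) := rfl
    refine ⟨fun x hx => hx, hV, fun x hx => Or.inl hx, ?_, by rw [hred]; simp⟩
    rintro x (⟨hx, hnx⟩ | hx) y _ _
    · exact absurd hx hnx
    · simp at hx
  | succ fuel ihf =>
    intro V stack size hV hss hb
    rcases List.eq_nil_or_concat stack with rfl | ⟨rest, c, rfl⟩
    · have hred : pvFlood mat n m (fuel + 1) V [] size = (size, V) := rfl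
      refine ⟨fun x hx => hx, hV, fun x hx => Or.inl hx, ?_, by rw [hred]; simp⟩
      rintro x (⟨hx, hnx⟩ | hx) y _ _
      · exact absurd hx hnx
      · simp at hx
    · rw [List.concat_eq_append] at *
      have hcV : c ∈ V := hss c (by simp)
      have hNs : ∀ z, z ∈ (pvNine c).filter (pvCondB mat n m V) ↔
          pvStep mat n m (pvMem V) c z := fun z => mem_pushFilter_iff mat n m V c z hcV
      have hNnodup : ((pvNine c).filter (pvCondB mat n m V)).Nodup :=
        List.Nodup.filter _ (nodup_pvNine c)
      have hNfresh : ∀ z ∈ (pvNine c).filter (pvCondB mat n m V), z ∉ V :=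
        fun z hz hmem => ((hNs z).1 hz).2.2 hmem
      have hNones : ∀ z ∈ (pvNine c).filter (pvCondB mat n m V), z ∈ pvOnes mat n m := by
        intro z hz
        obtain ⟨hnbr, hval, _⟩ := (hNs z).1 hz
        rw [mem_pvNbrs] at hnbr
        have hb' := hnbr.1
        simp only [pvInRange, decide_eq_true_eq] at hb'
        exact (mem_pvOnes mat n m z).2 ⟨by omega, hval⟩
      set N := (pvNine c).filter (pvCondB mat n m V) with hNdef
      have hunfold : pvFlood mat n m (fuel + 1) V (rest ++ [c]) size =
          pvFlood mat n m fuel (V ++ N) (rest ++ N) (size + 1) := by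
        show (match PySem.List.pop? (rest ++ [c]) (-1) with
          | none => (size, V)
          | some (c, rest) =>
            let size1 := size + 1
            let st := [(-1 : Int), 0, 1].foldl (fun st dx =>
                [(-1 : Int), 0, 1].foldl (fun (st : PySem.Set (Int × Int) × List (Int × Int)) dy =>
                  let nc := (c.1 + dx, c.2 + dy)
                  if (decide (0 ≤ nc.1 ∧ nc.1 < n ∧ 0 ≤ nc.2 ∧ nc.2 < m)) &&
                      !(PySem.Set.contains st.1 nc) && (pvVal mat nc == 1) then
                    (PySem.Set.add st.1 nc, st.2 ++ [nc])
                  else st) st) (V, rest)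
            pvFlood mat n m fuel st.1 st.2 size1) = _
        rw [PySem.List.pop?_last]
        simp only
        rw [flood_inner_eq mat n m c (V, rest), foldl_push mat n m (pvNine c) V rest (nodup_pvNine c)]
      rw [hunfold]
      have hV'nodup : (V ++ N).Nodup := by
        rw [List.nodup_append]
        refine ⟨hV, hNnodup, ?_⟩
        intro a ha b hb hab
        exact hNfresh b hb (hab ▸ ha)
      have hss' : ∀ s ∈ rest ++ N, s ∈ V ++ N := by
        intro s hs
        rcases List.mem_append.1 hs with h | h
        · exact List.mem_append.2 (Or.inl (hss s (List.mem_append.2 (Or.inl h))))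
        · exact List.mem_append.2 (Or.inr h)
      have hcard := card_drop mat n m V N hNnodup hNfresh hNones
      have hb' : (pvOnes mat n m \ (V ++ N).toFinset).card + (rest ++ N).length ≤ fuel := by
        rw [List.length_append] at hb ⊢
        simp only [List.length_cons, List.length_nil] at hb
        omega
      obtain ⟨fmono, fnodup, fsound, fclosed, fcount⟩ :=
        ihf (V ++ N) (rest ++ N) (size + 1) hV'nodup hss' hb'
      have hVsub : ∀ x ∈ V, x ∈ V ++ N := fun x hx => List.mem_append.2 (Or.inl hx)
      refine ⟨fun x hx => fmono x (hVsub x hx), fnodup, ?_, ?_, ?_⟩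
      · intro x hx
        rcases fsound x hx with hxVN | ⟨t, ht, hr⟩
        · rcases List.mem_append.1 hxVN with hxV | hxN
          · exact Or.inl hxV
          · exact Or.inr ⟨c, by simp, Relation.ReflTransGen.single ((hNs x).1 hxN)⟩
        · have hr' : pvReach mat n m (pvMem V) t x :=
            pvReach_mono mat n m (pvMem V) (pvMem (V ++ N)) (fun a ha => hVsub a ha) _ _ hr
          rcases List.mem_append.1 ht with htrest | htN
          · exact Or.inr ⟨t, List.mem_append.2 (Or.inl htrest), hr'⟩
          · exact Or.inr ⟨c, by simp, Relation.ReflTransGen.head ((hNs t).1 htN) hr'⟩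
      · rintro x (⟨hxr, hxV⟩ | hxs) y hynbr hyval
        · by_cases hxN : x ∈ N
          · exact fclosed x (Or.inr (List.mem_append.2 (Or.inr hxN))) y hynbr hyval
          · have hxVN : x ∉ V ++ N := by
              rw [List.mem_append]
              rintro (h | h)
              · exact hxV h
              · exact hxN h
            exact fclosed x (Or.inl ⟨hxr, hxVN⟩) y hynbr hyval
        · rcases List.mem_append.1 hxs with hxrest | hxc
          · exact fclosed x (Or.inr (List.mem_append.2 (Or.inl hxrest))) y hynbr hyval
          · have hxc' : x = c := by simpa using hxc
            subst hxc'
            by_cases hyV : y ∈ V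
            · exact fmono y (hVsub y hyV)
            · have hyN : y ∈ N := (hNs y).2 ⟨hynbr, hyval, hyV⟩
              exact fmono y (List.mem_append.2 (Or.inr hyN))
      · rw [fcount]
        rw [List.length_append, List.length_append, List.length_append]
        simp only [List.length_cons, List.length_nil]
        push_cast
        ring


lemma contains_congr (s t : PySem.Set (Int × Int)) (h : ∀ x, x ∈ s ↔ x ∈ t) (x : Int × Int) :
    PySem.Set.contains s x = PySem.Set.contains t x := by
  cases hs : PySem.Set.contains s x with
  | true => exact ((PySem.Set.contains_iff t x).2 ((h x).1 ((PySem.Set.contains_iff s x).1 hs))).symm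
  | false =>
    cases ht : PySem.Set.contains t x with
    | false => rfl
    | true =>
      have hx := (h x).2 ((PySem.Set.contains_iff t x).1 ht)
      rw [← PySem.Set.contains_iff s x, hs] at hx
      exact absurd hx (by simp)

-- One outer-loop body step: A and B started on the same fresh 1-cell mark the same set and
-- count the same component size.
lemma cell_glue (mat : List (List Int)) (n m : Int) (VA VB : PySem.Set (Int × Int))
    (c : Int × Int) (hA : VA.Nodup) (hB : VB.Nodup) (hmem : ∀ x, x ∈ VA ↔ x ∈ VB)
    (hbounds : 0 ≤ c.1 ∧ c.1 < n ∧ 0 ≤ c.2 ∧ c.2 < m) (hval : pvVal mat c = 1) (hcA : c ∉ VA) :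
    (pvDfs mat n m (n.toNat * m.toNat) (PySem.Set.add VA c) c).2.Nodup ∧
    (pvFlood mat n m (n.toNat * m.toNat) (PySem.Set.add VB c) [c] 0).2.Nodup ∧
    (∀ x, x ∈ (pvDfs mat n m (n.toNat * m.toNat) (PySem.Set.add VA c) c).2 ↔
      x ∈ (pvFlood mat n m (n.toNat * m.toNat) (PySem.Set.add VB c) [c] 0).2) ∧
    (pvDfs mat n m (n.toNat * m.toNat) (PySem.Set.add VA c) c).1 =
      (pvFlood mat n m (n.toNat * m.toNat) (PySem.Set.add VB c) [c] 0).1 := by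
  have hcB : c ∉ VB := fun h => hcA ((hmem c).2 h)
  have haddA : PySem.Set.add VA c = VA ++ [c] := PySem.Set.add_of_not_mem hcA
  have haddB : PySem.Set.add VB c = VB ++ [c] := PySem.Set.add_of_not_mem hcB
  have hc1 : c ∈ pvOnes mat n m := (mem_pvOnes mat n m c).2 ⟨hbounds, hval⟩
  have hA' : (VA ++ [c]).Nodup := by
    rw [List.nodup_append]
    refine ⟨hA, List.nodup_singleton c, ?_⟩
    intro a ha b hb hab
    have : b = c := by simpa using hb
    subst this
    exact hcA (hab ▸ ha)
  have hB' : (VB ++ [c]).Nodup := by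
    rw [List.nodup_append]
    refine ⟨hB, List.nodup_singleton c, ?_⟩
    intro a ha b hb hab
    have : b = c := by simpa using hb
    subst this
    exact hcB (hab ▸ ha)
  have hcA' : c ∈ VA ++ [c] := List.mem_append.2 (Or.inr (by simp))
  have hcB' : c ∈ VB ++ [c] := List.mem_append.2 (Or.inr (by simp))
  have hbndA : (pvOnes mat n m \ (VA ++ [c]).toFinset).card + 1 ≤ n.toNat * m.toNat :=
    card_top mat n m (VA ++ [c]) c hc1 hcA'
  have hbndB : (pvOnes mat n m \ (VB ++ [c]).toFinset).card + ([c] : List (Int × Int)).length ≤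
      n.toNat * m.toNat := by
    simpa using card_top mat n m (VB ++ [c]) c hc1 hcB'
  rw [haddA, haddB]
  obtain ⟨amono, anodup, asound, aclosed, acount⟩ :=
    pvDfs_spec mat n m (n.toNat * m.toNat) (VA ++ [c]) c hA' hcA' hbndA
  obtain ⟨bmono, bnodup, bsound, bclosed, bcount⟩ :=
    pvFlood_spec mat n m (n.toNat * m.toNat) (VB ++ [c]) [c] 0 hB'
      (fun s hs => List.mem_append.2 (Or.inr hs)) hbndB
  have charA := mark_char mat n m (VA ++ [c]) (pvDfs mat n m (n.toNat * m.toNat) (VA ++ [c]) c).2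
    [c] (fun s hs => List.mem_append.2 (Or.inr hs)) amono
    (fun x hx => (asound x hx).imp id (fun h => ⟨c, by simp, h⟩))
    (by
      rintro x (h | hx) y hy hv
      · exact aclosed x (Or.inl h) y hy hv
      · exact aclosed x (Or.inr (by simpa using hx)) y hy hv)
  have charB := mark_char mat n m (VB ++ [c]) (pvFlood mat n m (n.toNat * m.toNat) (VB ++ [c]) [c] 0).2
    [c] (fun s hs => List.mem_append.2 (Or.inr hs)) bmono bsound bclosed
  have hSeq : pvMem (VA ++ [c]) = pvMem (VB ++ [c]) := by
    ext x
    simp [pvMem, List.mem_append, hmem x]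
  have hmem' : ∀ x, x ∈ (pvDfs mat n m (n.toNat * m.toNat) (VA ++ [c]) c).2 ↔
      x ∈ (pvFlood mat n m (n.toNat * m.toNat) (VB ++ [c]) [c] 0).2 := by
    intro x
    rw [charA x, charB x, hSeq]
    simp [List.mem_append, hmem x]
  have hlen0 : VA.length = VB.length := length_eq_of_mem_iff hA hB hmem
  have hlenq : (pvDfs mat n m (n.toNat * m.toNat) (VA ++ [c]) c).2.length =
      (pvFlood mat n m (n.toNat * m.toNat) (VB ++ [c]) [c] 0).2.length :=
    length_eq_of_mem_iff anodup bnodup hmem'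
  refine ⟨anodup, bnodup, hmem', ?_⟩
  rw [acount, bcount, ← hlenq]
  rw [List.length_append, List.length_append]
  simp only [List.length_singleton]
  push_cast
  omega

def pvCells (n m : Int) : List (Int × Int) :=
  (PySem.List.pyRange 0 n 1).flatMap fun i => (PySem.List.pyRange 0 m 1).map fun j => (i, j)

def pvStepA (mat : List (List Int)) (n m : Int) (st : List Int × PySem.Set (Int × Int))
    (c : Int × Int) : List Int × PySem.Set (Int × Int) :=
  if (pvVal mat c == 1) && !(PySem.Set.contains st.2 c) then
    (st.1 ++ [(pvDfs mat n m (n.toNat * m.toNat) (PySem.Set.add st.2 c) c).1],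
     (pvDfs mat n m (n.toNat * m.toNat) (PySem.Set.add st.2 c) c).2)
  else st

def pvStepB (mat : List (List Int)) (n m : Int) (st : List Int × PySem.Set (Int × Int))
    (c : Int × Int) : List Int × PySem.Set (Int × Int) :=
  if (pvVal mat c == 1) && !(PySem.Set.contains st.2 c) then
    (st.1 ++ [(pvFlood mat n m (n.toNat * m.toNat) (PySem.Set.add st.2 c) [c] 0).1],
     (pvFlood mat n m (n.toNat * m.toNat) (PySem.Set.add st.2 c) [c] 0).2)
  else st

lemma foldl_cells {β : Type} (n m : Int) (h : β → (Int × Int) → β) (init : β) :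
    (PySem.List.pyRange 0 n 1).foldl (fun st i =>
        (PySem.List.pyRange 0 m 1).foldl (fun st j => h st (i, j)) st) init
      = (pvCells n m).foldl h init := by
  simp only [pvCells, List.foldl_flatMap, List.foldl_map]

lemma f_eq (mat : List (List Int)) :
    f mat = (PySem.List.max? ((pvCells (mat.length : Int) ((mat.headD []).length : Int)).foldl
      (pvStepA mat (mat.length : Int) ((mat.headD []).length : Int))
      (([] : List Int), (PySem.Set.empty : PySem.Set (Int × Int)))).1 (fun x => x)).getD 0 := by
  rw [← foldl_cells (mat.length : Int) ((mat.headD []).length : Int)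
    (pvStepA mat (mat.length : Int) ((mat.headD []).length : Int))
    (([] : List Int), (PySem.Set.empty : PySem.Set (Int × Int)))]
  rfl

lemma f_alt_eq (mat : List (List Int)) :
    f_alt mat = (PySem.List.max? ((pvCells (mat.length : Int) ((mat.headD []).length : Int)).foldl
      (pvStepB mat (mat.length : Int) ((mat.headD []).length : Int))
      (([] : List Int), (PySem.Set.empty : PySem.Set (Int × Int)))).1 (fun x => x)).getD 0 := by
  rw [← foldl_cells (mat.length : Int) ((mat.headD []).length : Int)
    (pvStepB mat (mat.length : Int) ((mat.headD []).length : Int))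
    (([] : List Int), (PySem.Set.empty : PySem.Set (Int × Int)))]
  rfl

lemma outer_glue (mat : List (List Int)) (n m : Int) :
    ∀ (l : List (Int × Int)), (∀ c ∈ l, 0 ≤ c.1 ∧ c.1 < n ∧ 0 ≤ c.2 ∧ c.2 < m) →
    ∀ (stA stB : List Int × PySem.Set (Int × Int)),
      stA.2.Nodup → stB.2.Nodup → (∀ x, x ∈ stA.2 ↔ x ∈ stB.2) →
      stB.1 = stA.1 →
      ((l.foldl (pvStepA mat n m) stA).2.Nodup ∧
       (l.foldl (pvStepB mat n m) stB).2.Nodup ∧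
       (∀ x, x ∈ (l.foldl (pvStepA mat n m) stA).2 ↔ x ∈ (l.foldl (pvStepB mat n m) stB).2) ∧
       (l.foldl (pvStepB mat n m) stB).1 = (l.foldl (pvStepA mat n m) stA).1) := by
  intro l
  induction l with
  | nil =>
    intro _ stA stB h1 h2 h3 h4
    exact ⟨h1, h2, h3, h4⟩
  | cons c l ih =>
    intro hbnd stA stB h1 h2 h3 h4
    have hcb := hbnd c (by simp)
    have hbnd' : ∀ c ∈ l, 0 ≤ c.1 ∧ c.1 < n ∧ 0 ≤ c.2 ∧ c.2 < m :=
      fun a ha => hbnd a (List.mem_cons_of_mem _ ha)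
    have hcont : PySem.Set.contains stA.2 c = PySem.Set.contains stB.2 c :=
      contains_congr stA.2 stB.2 h3 c
    simp only [List.foldl_cons]
    by_cases hcond : ((pvVal mat c == 1) && !(PySem.Set.contains stA.2 c)) = true
    · have hcond2 := hcond
      rw [Bool.and_eq_true] at hcond2
      have hval : pvVal mat c = 1 := beq_iff_eq.1 hcond2.1
      have hcA : c ∉ stA.2 := by
        have h' := hcond2.2
        rw [Bool.not_eq_true'] at h'
        intro hmemc
        rw [← PySem.Set.contains_iff stA.2 c, h'] at hmemc
        exact absurd hmemc (by simp)
      obtain ⟨qAn, qBn, qmem, qeq⟩ :=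
        cell_glue mat n m stA.2 stB.2 c h1 h2 h3 hcb hval hcA
      have hstepA : pvStepA mat n m stA c =
          (stA.1 ++ [(pvDfs mat n m (n.toNat * m.toNat) (PySem.Set.add stA.2 c) c).1],
           (pvDfs mat n m (n.toNat * m.toNat) (PySem.Set.add stA.2 c) c).2) := by
        rw [pvStepA, if_pos hcond]
      have hstepB : pvStepB mat n m stB c =
          (stB.1 ++ [(pvFlood mat n m (n.toNat * m.toNat) (PySem.Set.add stB.2 c) [c] 0).1],
           (pvFlood mat n m (n.toNat * m.toNat) (PySem.Set.add stB.2 c) [c] 0).2) := by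
        rw [pvStepB, if_pos (by rw [← hcont]; exact hcond)]
      rw [hstepA, hstepB]
      apply ih hbnd'
      · exact qAn
      · exact qBn
      · exact qmem
      · rw [h4, qeq]
    · have hstepA : pvStepA mat n m stA c = stA := by rw [pvStepA, if_neg hcond]
      have hstepB : pvStepB mat n m stB c = stB := by
        rw [pvStepB, if_neg (by rw [← hcont]; exact hcond)]
      rw [hstepA, hstepB]
      exact ih hbnd' stA stB h1 h2 h3 h4

theorem f_spec : Claim_equal_f := by
  unfold Claim_equal_f Spec_f
  intro mat _ _
  rw [f_eq, f_alt_eq]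
  have hcells : ∀ c ∈ pvCells (mat.length : Int) ((mat.headD []).length : Int),
      0 ≤ c.1 ∧ c.1 < (mat.length : Int) ∧ 0 ≤ c.2 ∧ c.2 < ((mat.headD []).length : Int) := by
    intro c hc
    simp only [pvCells, List.mem_flatMap, List.mem_map, PySem.List.mem_pyRange_one] at hc
    obtain ⟨i, hi, j, hj, rfl⟩ := hc
    exact ⟨hi.1, hi.2, hj.1, hj.2⟩
  obtain ⟨-, -, -, hsizes⟩ := outer_glue mat (mat.length : Int) ((mat.headD []).length : Int)
    (pvCells (mat.length : Int) ((mat.headD []).length : Int)) hcells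
    (([] : List Int), (PySem.Set.empty : PySem.Set (Int × Int)))
    (([] : List Int), (PySem.Set.empty : PySem.Set (Int × Int)))
    (by simp [PySem.Set.empty]) (by simp [PySem.Set.empty]) (by simp [PySem.Set.empty]) rfl
  rw [hsizes]
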